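-- pv_equiv track=rewrite | github.com/ditthales/ListasIP | recursao/aaaa.py | calcula_derivada_de_ordem
-- ===== SOURCE A (Python) =====
-- def calcula_derivada_de_ordem(coeficientes, n):
--     if n >= len(coeficientes):
--         return[0]
--
--     if n == 0:
--         return coeficientes
--
--     derivada_coeficientes = []
--     for i in range(1, len(coeficientes)):
--         derivada_coeficientes.append(i * coeficientes[i])
--
--     return calcula_derivada_de_ordem(derivada_coeficientes, n - 1)
-- ===== SOURCE B (Python) =====
-- def calcula_derivada_de_ordem(coeficientes, n):
--     if n >= len(coeficientes):
--         return [0]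
--     if n == 0:
--         return coeficientes
--     fator = 1
--     for k in range(1, n + 1):
--         fator *= k
--     resultado = []
--     for j in range(len(coeficientes) - n):
--         resultado.append(fator * coeficientes[j + n])
--         fator = fator * (j + n + 1) // (j + 1)
--     return resultado
-- ===== Notes on version B (the rewrite author's own statement) =====
-- stated objective: faster
-- what changed: replaces A's n-fold recursive re-differentiation with a single pass that computes each output coefficient as coef[j+n] times a falling factorial maintained incrementally (one mul and one exact division per element)
import Mathlib
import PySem

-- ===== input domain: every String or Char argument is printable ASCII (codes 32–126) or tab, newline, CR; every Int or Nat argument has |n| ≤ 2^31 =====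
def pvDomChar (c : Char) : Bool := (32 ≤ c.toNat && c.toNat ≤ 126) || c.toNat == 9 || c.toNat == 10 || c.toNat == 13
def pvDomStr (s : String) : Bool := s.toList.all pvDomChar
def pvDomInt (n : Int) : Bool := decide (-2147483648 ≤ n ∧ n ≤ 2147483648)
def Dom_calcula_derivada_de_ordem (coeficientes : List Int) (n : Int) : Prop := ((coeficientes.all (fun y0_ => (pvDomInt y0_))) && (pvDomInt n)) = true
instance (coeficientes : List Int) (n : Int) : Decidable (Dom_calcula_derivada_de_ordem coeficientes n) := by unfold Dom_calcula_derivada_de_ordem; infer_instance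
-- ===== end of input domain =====

-- B computes each coefficient directly as coef[j+n] times an incrementally maintained
-- falling factorial (one pass), instead of A's n repeated symbolic differentiations.

-- ===== PORT A =====
def calcula_derivada_de_ordem (coeficientes : List Int) (n : Int) : List Int :=
  if n ≥ (coeficientes.length : Int) then [0]
  else if n = 0 then coeficientes
  else if coeficientes.length = 0 then []
    -- ^ totality guard only: here n < 0 and the Python recurses forever; unreachable under Pre_
  else
    calcula_derivada_de_ordem
      ((PySem.List.pyRange 1 (coeficientes.length : Int) 1).foldl
        (fun acc i => acc ++ [i * PySem.List.pyGetD coeficientes i 0]) [])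
      (n - 1)
termination_by coeficientes.length
decreasing_by
  rw [PySem.List.foldl_append_singleton_eq_map]
  simp [PySem.List.pyRange_one]
  omega

-- ===== PORT B =====
def calcula_derivada_de_ordem_alt (coeficientes : List Int) (n : Int) : List Int :=
  if n ≥ (coeficientes.length : Int) then [0]
  else if n = 0 then coeficientes
  else
    let fator := (PySem.List.pyRange 1 (n + 1) 1).foldl (fun f k => f * k) 1
    let st := (PySem.List.pyRange 0 ((coeficientes.length : Int) - n) 1).foldl
        (fun (st : List Int × Int) j =>
          (st.1 ++ [st.2 * PySem.List.pyGetD coeficientes (j + n) 0],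
           PySem.Int.floordiv (st.2 * (j + n + 1)) (j + 1)))
        ([], fator)
    st.1

-- ===== PRECONDITION & SPEC =====
-- Pre_ excludes n < 0, on which the Python A recurses forever (RecursionError).
def Pre_calcula_derivada_de_ordem (coeficientes : List Int) (n : Int) : Prop := 0 ≤ n
instance (coeficientes : List Int) (n : Int) : Decidable (Pre_calcula_derivada_de_ordem coeficientes n) := by unfold Pre_calcula_derivada_de_ordem; infer_instance
def pvWitness_calcula_derivada_de_ordem : List Int × Int := ([1, 2, 3], 1)
def Spec_calcula_derivada_de_ordem (coeficientes : List Int) (n : Int) (out : List Int) : Prop := out = calcula_derivada_de_ordem_alt coeficientes n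
instance (coeficientes : List Int) (n : Int) (out : List Int) : Decidable (Spec_calcula_derivada_de_ordem coeficientes n out) := by unfold Spec_calcula_derivada_de_ordem; infer_instance

-- ===== CLAIM (what is proved, stated in full; the proofs are below) =====
def Claim_equal_calcula_derivada_de_ordem : Prop := ∀ (coeficientes : List Int) (n : Int), Dom_calcula_derivada_de_ordem coeficientes n → Pre_calcula_derivada_de_ordem coeficientes n → Spec_calcula_derivada_de_ordem coeficientes n (calcula_derivada_de_ordem coeficientes n)

-- ===== LEMMAS AND PROOFS =====

-- falling factorial (j+1)(j+2)…(j+m)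
def ffall (j m : Nat) : Int := ∏ k ∈ Finset.range m, (((j + k : Nat) : Int) + 1)

-- the closed form both ports are reduced to
def dform (c : List Int) (m : Nat) : List Int :=
  (List.range (c.length - m)).map (fun j => ffall j m * c.getD (j + m) 0)

-- one symbolic differentiation, as a map (what A's inner loop builds)
def deriv1 (c : List Int) : List Int :=
  (List.range (c.length - 1)).map (fun (j : Nat) => ((j : Int) + 1) * c.getD (j + 1) 0)

lemma derivLoop_eq (c : List Int) :
    (PySem.List.pyRange 1 (c.length : Int) 1).foldl
      (fun acc i => acc ++ [i * PySem.List.pyGetD c i 0]) [] = deriv1 c := by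
  rw [PySem.List.foldl_append_singleton_eq_map, PySem.List.pyRange_one]
  unfold deriv1
  have h : ((c.length : Int) - 1).toNat = c.length - 1 := by omega
  rw [h, List.map_map]
  apply List.map_congr_left
  intro k _
  simp only [Function.comp_apply]
  have hk : (1 : Int) + (k : Int) = ((k + 1 : Nat) : Int) := by push_cast; ring
  rw [hk, PySem.List.pyGetD_natCast]
  push_cast
  ring

lemma dform_zero (c : List Int) : dform c 0 = c := by
  unfold dform ffall
  simp
  apply List.ext_getElem
  · simp
  · intro i h1 h2
    simp [h2]

lemma ffall_succ (j m : Nat) : ffall j (m + 1) = ffall j m * ((j : Int) + (m : Int) + 1) := by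
  unfold ffall
  rw [Finset.prod_range_succ]
  push_cast
  ring

lemma ffall_shift (j m : Nat) :
    ffall j m * ((j : Int) + (m : Int) + 1) = ffall (j + 1) m * ((j : Int) + 1) := by
  have h1 := ffall_succ j m
  have h2 : ffall j (m + 1) = ffall (j + 1) m * ((j : Int) + 1) := by
    unfold ffall
    rw [Finset.prod_range_succ']
    have : ∀ k ∈ Finset.range m, (((j + (k + 1) : Nat) : Int) + 1) = (((j + 1 + k : Nat) : Int) + 1) := by
      intro k _; congr 2; omega
    rw [Finset.prod_congr rfl this]
    push_cast
    ring
  rw [← h1, h2]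

lemma deriv1_length (c : List Int) : (deriv1 c).length = c.length - 1 := by
  simp [deriv1]

lemma dform_deriv (c : List Int) (m : Nat) :
    dform (deriv1 c) m = dform c (m + 1) := by
  unfold dform
  rw [deriv1_length]
  have h : c.length - 1 - m = c.length - (m + 1) := by omega
  rw [h]
  apply List.map_congr_left
  intro j hj
  rw [List.mem_range] at hj
  have hidx : j + m < c.length - 1 := by omega
  have hget : (deriv1 c).getD (j + m) 0 = (((j + m : Nat) : Int) + 1) * c.getD (j + m + 1) 0 := by
    unfold deriv1
    rw [List.getD_eq_getElem?_getD, List.getElem?_map, List.getElem?_range hidx]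
    simp
  rw [hget, ffall_succ]
  have : j + m + 1 = j + (m + 1) := by omega
  rw [this]
  push_cast
  ring

lemma A_eq_dform (m : Nat) : ∀ c : List Int, (m : Int) < (c.length : Int) →
    calcula_derivada_de_ordem c (m : Int) = dform c m := by
  induction m with
  | zero =>
    intro c h
    rw [calcula_derivada_de_ordem]
    rw [if_neg (by omega), if_pos (by norm_num)]
    exact (dform_zero c).symm
  | succ m ih =>
    intro c h
    rw [calcula_derivada_de_ordem]
    have h1 : ¬ ((m + 1 : Nat) : Int) ≥ (c.length : Int) := by omega
    have h2 : ((m + 1 : Nat) : Int) ≠ 0 := by omega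
    have h3 : ¬ (c.length = 0) := by omega
    rw [if_neg h1, if_neg h2, if_neg h3]
    rw [derivLoop_eq]
    have h4 : ((m + 1 : Nat) : Int) - 1 = (m : Int) := by push_cast; ring
    rw [h4]
    have h5 : (m : Int) < ((deriv1 c).length : Int) := by
      rw [deriv1_length]; omega
    rw [ih (deriv1 c) h5, dform_deriv]

lemma ffall_step (j m : Nat) :
    PySem.Int.floordiv (ffall j m * ((j : Int) + (m : Int) + 1)) ((j : Int) + 1) = ffall (j + 1) m := by
  rw [ffall_shift]
  rw [PySem.Int.floordiv_eq_ediv_of_pos (by positivity)]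
  exact Int.mul_ediv_cancel _ (by positivity)

lemma foldl_mul_range (m : Nat) :
    ((List.range m).map (fun (k : Nat) => (1 : Int) + (k : Int))).foldl (fun f k => f * k) 1 = ffall 0 m := by
  induction m with
  | zero => simp [ffall]
  | succ m ih =>
    rw [List.range_succ, List.map_append, List.foldl_append, ih]
    simp only [List.map_cons, List.map_nil, List.foldl_cons, List.foldl_nil]
    rw [ffall_succ]
    push_cast
    ring

lemma fator_init (m : Nat) :
    (PySem.List.pyRange 1 ((m : Int) + 1) 1).foldl (fun f k => f * k) 1 = ffall 0 m := by
  rw [PySem.List.pyRange_one]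
  have h : ((m : Int) + 1 - 1).toNat = m := by omega
  rw [h, foldl_mul_range]

lemma loop_inv (c : List Int) (m t : Nat) :
    ((List.range t).map (fun (k : Nat) => (k : Int))).foldl
      (fun (st : List Int × Int) j =>
        (st.1 ++ [st.2 * PySem.List.pyGetD c (j + (m : Int)) 0],
         PySem.Int.floordiv (st.2 * (j + (m : Int) + 1)) (j + 1)))
      ([], ffall 0 m)
    = ((List.range t).map (fun j => ffall j m * c.getD (j + m) 0), ffall t m) := by
  induction t with
  | zero => simp
  | succ t ih =>
    rw [List.range_succ]
    simp only [List.map_append, List.map_cons, List.map_nil, List.foldl_append,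
      List.foldl_cons, List.foldl_nil]
    rw [ih]
    have hg : PySem.List.pyGetD c ((t : Int) + (m : Int)) 0 = c.getD (t + m) 0 := by
      have h : (t : Int) + (m : Int) = ((t + m : Nat) : Int) := by push_cast; ring
      rw [h, PySem.List.pyGetD_natCast]
    simp only [hg]
    rw [ffall_step]

lemma B_eq_dform (c : List Int) (m : Nat) (h1 : 0 < m) (h2 : (m : Int) < (c.length : Int)) :
    calcula_derivada_de_ordem_alt c (m : Int) = dform c m := by
  unfold calcula_derivada_de_ordem_alt
  rw [if_neg (by omega), if_neg (by exact_mod_cast Nat.pos_iff_ne_zero.mp h1)]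
  rw [fator_init]
  have hr : PySem.List.pyRange 0 ((c.length : Int) - (m : Int)) 1
      = (List.range (c.length - m)).map (fun (k : Nat) => (k : Int)) := by
    rw [PySem.List.pyRange_one]
    have : ((c.length : Int) - (m : Int) - 0).toNat = c.length - m := by omega
    rw [this]
    simp
  rw [hr]
  simp only [loop_inv]
  rfl

-- ===== VERDICT (by name: the statement is the Claim_ definition above) =====
theorem calcula_derivada_de_ordem_spec : Claim_equal_calcula_derivada_de_ordem := by
  intro c n _ hpre
  unfold Spec_calcula_derivada_de_ordem Pre_calcula_derivada_de_ordem at *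
  by_cases hge : n ≥ (c.length : Int)
  · rw [calcula_derivada_de_ordem, if_pos hge]
    unfold calcula_derivada_de_ordem_alt
    rw [if_pos hge]
  · by_cases hz : n = 0
    · subst hz
      rw [calcula_derivada_de_ordem, if_neg hge, if_pos rfl]
      unfold calcula_derivada_de_ordem_alt
      rw [if_neg hge, if_pos rfl]
    · have hn : n = ((n.toNat : Nat) : Int) := by omega
      rw [hn]
      rw [A_eq_dform n.toNat c (by omega), B_eq_dform c n.toNat (by omega) (by omega)]
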